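-- pv_equiv track=rewrite | github.com/kmehran1106/HackerRank-Python | Garbage/ACM Team/code_acm_team.py | get_acm_team
-- ===== SOURCE A (Python) =====
-- from typing import List
--
-- def get_acm_team(array: List[str]) -> List[int]:
--     n = len(array)      # total number of people
--     m = len(array[0])   # total number of topics
--
--     max_topics = 0
--     num_teams = 0
--
--     b = [ [p[i] == "1" for i in range(m)] for p in array]
--
--     for i in range(n):
--         for j in range(i+1, n):
--             f = 0
--             for x in range(m):
--                 f = f + 1 if b[i][x] or b[j][x] else f
--             if f == max_topics:
--                 num_teams += 1
--             elif f > max_topics: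
--                 num_teams = 1
--                 max_topics = f
--     return [max_topics, num_teams]
-- ===== SOURCE B (Python) =====
-- from typing import List
--
-- def get_acm_team(array: List[str]) -> List[int]:
--     n = len(array)
--     m = len(array[0])
--
--     # pack each person's topic row into one integer bitmask
--     masks = []
--     for s in array:
--         mask = 0
--         for c in reversed(s[:m]):
--             mask = 2 * mask + (c == "1")
--         masks.append(mask)
--
--     # staged: materialise every pair score, then take max and count it
--     scores = [(masks[i] | masks[j]).bit_count() for i in range(n) for j in range(i + 1, n)]
--     best = max(scores, default=0)
--     return [best, scores.count(best)]
-- ===== Notes on version B (the rewrite author's own statement) =====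
-- stated objective: faster
-- what changed: B packs each row into an integer bitmask and replaces A's online max/count accumulator over a per-topic inner loop by a staged pipeline: materialise the OR-popcount score of every pair as a flat list, then take its max and count that maximum.
import Mathlib
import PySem

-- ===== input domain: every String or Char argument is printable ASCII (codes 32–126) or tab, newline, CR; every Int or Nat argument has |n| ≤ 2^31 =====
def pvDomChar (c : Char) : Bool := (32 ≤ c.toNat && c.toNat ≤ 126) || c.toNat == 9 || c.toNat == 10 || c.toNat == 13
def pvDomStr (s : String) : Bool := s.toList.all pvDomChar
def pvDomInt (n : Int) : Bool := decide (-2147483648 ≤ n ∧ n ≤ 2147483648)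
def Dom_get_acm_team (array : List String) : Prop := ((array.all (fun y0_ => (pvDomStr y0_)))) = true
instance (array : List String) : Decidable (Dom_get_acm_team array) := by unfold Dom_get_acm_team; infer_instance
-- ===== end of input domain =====

-- B packs rows into integer bitmasks and replaces A's online max/count accumulator by a staged
-- pipeline (flat list of OR+popcount pair scores, then max, then count) — objective: faster.

-- ===== PORT A =====
def get_acm_team (array : List String) : List Int :=
  let n : Int := PySem.List.len array
  let m : Int := PySem.Str.len (PySem.List.pyGetD array 0 "")
  let b : List (List Bool) :=
    array.map (fun p => (PySem.List.pyRange 0 m).map (fun i => PySem.Str.pyGet? p i == some '1'))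
  let r : Int × Int :=
    (PySem.List.pyRange 0 n).foldl (fun st i =>
      (PySem.List.pyRange (i + 1) n).foldl (fun st j =>
        let f : Int :=
          (PySem.List.pyRange 0 m).foldl (fun f x =>
            if PySem.List.pyGetD (PySem.List.pyGetD b i []) x false
               || PySem.List.pyGetD (PySem.List.pyGetD b j []) x false
            then f + 1 else f) 0
        if f = st.1 then (st.1, st.2 + 1)
        else if f > st.1 then (f, 1)
        else st) st) (0, 0)
  [r.1, r.2]

-- ===== PORT B =====
-- mask of one row: for c in reversed(s[:m]): mask = 2 * mask + (c == "1")
def pvMask (m : Int) (s : String) : Int :=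
  ((PySem.Str.slice s none (some m)).toList.reverse).foldl
    (fun mask c => 2 * mask + (if c == '1' then 1 else 0)) 0

def get_acm_team_alt (array : List String) : List Int :=
  let n : Int := PySem.List.len array
  let m : Int := PySem.Str.len (PySem.List.pyGetD array 0 "")
  let masks : List Int := array.map (fun s => pvMask m s)
  -- scores = [(masks[i] | masks[j]).bit_count() for i in range(n) for j in range(i + 1, n)]
  let scores : List Int :=
    (PySem.List.pyRange 0 n).flatMap (fun i =>
      (PySem.List.pyRange (i + 1) n).map (fun j =>
        ((PySem.Int.bitCount (PySem.Int.bor (PySem.List.pyGetD masks i 0)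
            (PySem.List.pyGetD masks j 0)) : Nat) : Int)))
  let best : Int := PySem.List.maxD scores (fun x => x) 0   -- max(scores, default=0)
  [best, (PySem.List.count scores best : Int)]

-- ===== PRECONDITION & SPEC =====
-- Pre_ excludes exactly the inputs where A raises IndexError: the empty list (array[0]),
-- and lists containing a string shorter than the first one (p[i] out of range).
def Pre_get_acm_team (array : List String) : Prop :=
  array ≠ [] ∧ ∀ s ∈ array, PySem.Str.len (PySem.List.pyGetD array 0 "") ≤ PySem.Str.len s
instance (array : List String) : Decidable (Pre_get_acm_team array) := by
  unfold Pre_get_acm_team; infer_instance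
def pvWitness_get_acm_team : List String := ["10", "11"]

def Spec_get_acm_team (array : List String) (out : List Int) : Prop := out = get_acm_team_alt array
instance (array : List String) (out : List Int) : Decidable (Spec_get_acm_team array out) := by
  unfold Spec_get_acm_team; infer_instance

-- ===== CLAIM (what is proved, stated in full; the proofs are below) =====
def Claim_equal_get_acm_team : Prop := ∀ (array : List String), Dom_get_acm_team array → Pre_get_acm_team array → Spec_get_acm_team array (get_acm_team array)


-- ===== LEMMAS AND PROOFS =====

def pvBit (c : Char) : Nat := if c == '1' then 1 else 0

def pvMaskR : List Char → Nat
  | [] => 0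
  | c :: cs => pvBit c + 2 * pvMaskR cs

lemma pv_lor_bit (x y : Bool) (a b : Nat) :
    (x.toNat + 2 * a) ||| (y.toNat + 2 * b) = (x || y).toNat + 2 * (a ||| b) := by
  have h1 : x.toNat + 2 * a = Nat.bit x a := by rw [Nat.bit_val]; ring
  have h2 : y.toNat + 2 * b = Nat.bit y b := by rw [Nat.bit_val]; ring
  have h3 : (x || y).toNat + 2 * (a ||| b) = Nat.bit (x || y) (a ||| b) := by rw [Nat.bit_val]; ring
  rw [h1, h2, h3]
  exact Nat.lor_bit x a y b

lemma pv_bitCount_bit (x : Bool) (a : Nat) :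
    PySem.Int.bitCount ((x.toNat + 2 * a : Nat) : Int) = x.toNat + PySem.Int.bitCount ((a : Nat) : Int) := by
  by_cases h : x.toNat + 2 * a = 0
  · have hx : x = false := by cases x <;> simp_all
    have ha : a = 0 := by omega
    subst hx
    subst ha
    simp [PySem.Int.bitCount_zero]
  · rw [PySem.Int.bitCount_natCast (Nat.pos_of_ne_zero h)]
    have h2 : (x.toNat + 2 * a) % 2 = x.toNat := by cases x <;> simp only [Bool.toNat_false, Bool.toNat_true] <;> omega
    have h3 : (x.toNat + 2 * a) / 2 = a := by cases x <;> simp only [Bool.toNat_false, Bool.toNat_true] <;> omega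
    rw [h2, h3]

lemma pv_revfold (u : List Char) :
    u.reverse.foldl (fun acc c => 2 * acc + (if c == '1' then 1 else 0)) (0 : Int) = ((pvMaskR u : Nat) : Int) := by
  induction u with
  | nil => simp [pvMaskR]
  | cons c u ih =>
    rw [List.reverse_cons, List.foldl_append, ih]
    by_cases h : c = '1' <;> simp [pvMaskR, pvBit, h] <;> omega

lemma pv_mask_eq (m' : Nat) (s : String) :
    pvMask ((m' : Nat) : Int) s = ((pvMaskR (s.toList.take m') : Nat) : Int) := by
  have hs : (PySem.Str.slice s none (some ((m' : Nat) : Int))).toList = s.toList.take m' := by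
    simp [PySem.Str.slice]
  simp only [pvMask]
  rw [hs, pv_revfold]

lemma pv_key (m' : Nat) : ∀ (L M : List Char), m' ≤ L.length → m' ≤ M.length →
    PySem.Int.bitCount (PySem.Int.bor ((pvMaskR (L.take m') : Nat) : Int) ((pvMaskR (M.take m') : Nat) : Int))
      = (List.range m').countP (fun k => (L[k]? == some '1') || (M[k]? == some '1')) := by
  induction m' with
  | zero =>
    intro L M _ _
    simp [pvMaskR]
  | succ k ih =>
    intro L M hL hM
    cases L with
    | nil => simp at hL
    | cons c L' =>
      cases M with
      | nil => simp at hM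
      | cons d M' =>
        simp only [List.take_succ_cons]
        have hmL : pvMaskR (c :: L'.take k) = (c == '1').toNat + 2 * pvMaskR (L'.take k) := by
          cases h : c == '1' <;> simp [pvMaskR, pvBit, h]
        have hmM : pvMaskR (d :: M'.take k) = (d == '1').toNat + 2 * pvMaskR (M'.take k) := by
          cases h : d == '1' <;> simp [pvMaskR, pvBit, h]
        rw [hmL, hmM, PySem.Int.bor_natCast, pv_lor_bit, pv_bitCount_bit, ← PySem.Int.bor_natCast,
            ih L' M' (by simp at hL; omega) (by simp at hM; omega)]
        rw [List.range_succ_eq_map, List.countP_cons, List.countP_map]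
        have hcomp : ((fun k2 => ((c :: L')[k2]? == some '1') || ((d :: M')[k2]? == some '1')) ∘ Nat.succ)
            = fun k2 => ((L'[k2]? == some '1') || (M'[k2]? == some '1')) := by
          funext t
          simp
        rw [hcomp]
        cases h1 : (c == '1') <;> cases h2 : (d == '1') <;> simp [h1, h2] <;> omega

lemma pv_pair (arr : List String) (m' : Nat) (hm : ∀ s ∈ arr, m' ≤ s.toList.length)
    (i j : Int) (hi0 : 0 ≤ i) (hi : i < (arr.length : Int)) (hj0 : 0 ≤ j) (hj : j < (arr.length : Int)) :
    (PySem.List.pyRange 0 ((m' : Nat) : Int)).foldl (fun f x =>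
        if PySem.List.pyGetD (PySem.List.pyGetD (arr.map (fun p => (PySem.List.pyRange 0 ((m' : Nat) : Int)).map (fun t => PySem.Str.pyGet? p t == some '1'))) i []) x false
           || PySem.List.pyGetD (PySem.List.pyGetD (arr.map (fun p => (PySem.List.pyRange 0 ((m' : Nat) : Int)).map (fun t => PySem.Str.pyGet? p t == some '1'))) j []) x false
        then f + 1 else f) (0 : Int)
    = ((PySem.Int.bitCount (PySem.Int.bor (PySem.List.pyGetD (arr.map (fun s => pvMask ((m' : Nat) : Int) s)) i 0)
        (PySem.List.pyGetD (arr.map (fun s => pvMask ((m' : Nat) : Int) s)) j 0)) : Nat) : Int) := by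
  have hib : i.toNat < arr.length := by omega
  have hjb : j.toNat < arr.length := by omega
  have hcong :
      (PySem.List.pyRange 0 ((m' : Nat) : Int)).foldl (fun f x =>
        if PySem.List.pyGetD (PySem.List.pyGetD (arr.map (fun p => (PySem.List.pyRange 0 ((m' : Nat) : Int)).map (fun t => PySem.Str.pyGet? p t == some '1'))) i []) x false
           || PySem.List.pyGetD (PySem.List.pyGetD (arr.map (fun p => (PySem.List.pyRange 0 ((m' : Nat) : Int)).map (fun t => PySem.Str.pyGet? p t == some '1'))) j []) x false
        then f + 1 else f) (0 : Int)
      = (PySem.List.pyRange 0 ((m' : Nat) : Int)).foldl (fun f x =>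
        if (PySem.Str.pyGet? arr[i.toNat] x == some '1') || (PySem.Str.pyGet? arr[j.toNat] x == some '1')
        then f + 1 else f) (0 : Int) := by
    refine PySem.List.foldl_congr_mem _ _ _ _ ?_
    intro acc x hx
    obtain ⟨hx0, hxm⟩ := PySem.List.mem_pyRange_one.mp hx
    rw [PySem.List.pyGetD_eq_getElem _ _ hi0 (by simpa using hi),
        PySem.List.pyGetD_eq_getElem _ _ hj0 (by simpa using hj)]
    simp only [List.getElem_map]
    rw [PySem.List.pyGetD_map_pyRange_of_nonneg _ _ _ _ hx0 hxm,
        PySem.List.pyGetD_map_pyRange_of_nonneg _ _ _ _ hx0 hxm]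
  rw [hcong,
      PySem.List.foldl_if_add_one
        (fun x => (PySem.Str.pyGet? arr[i.toNat] x == some '1') || (PySem.Str.pyGet? arr[j.toNat] x == some '1')),
      zero_add]
  rw [PySem.List.pyGetD_eq_getElem _ _ hi0 (by simpa using hi),
      PySem.List.pyGetD_eq_getElem _ _ hj0 (by simpa using hj)]
  simp only [List.getElem_map]
  rw [pv_mask_eq, pv_mask_eq,
      pv_key m' arr[i.toNat].toList arr[j.toNat].toList (hm _ (List.getElem_mem hib)) (hm _ (List.getElem_mem hjb))]
  rw [PySem.List.pyRange_zero_natCast, List.countP_map]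
  have hcomp : ((fun x => (PySem.Str.pyGet? arr[i.toNat] x == some '1') || (PySem.Str.pyGet? arr[j.toNat] x == some '1')) ∘ (fun k : Nat => (k : Int)))
      = fun k : Nat => ((arr[i.toNat].toList[k]? == some '1') || (arr[j.toNat].toList[k]? == some '1')) := by
    funext t
    simp
  rw [hcomp]

-- A's online accumulator over ANY score list computes (running max from 0, count of that max).
lemma pv_fold_max_count (L : List Int) :
    L.foldl (fun st f => if f = st.1 then (st.1, st.2 + 1) else if f > st.1 then (f, (1 : Int)) else st)
      ((0 : Int), (0 : Int))
    = (L.foldl max 0, (List.count (L.foldl max 0) L : Int)) := by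
  induction L using List.reverseRecOn with
  | nil => simp
  | append_singleton L f ih =>
    rw [List.foldl_append, List.foldl_append, ih]
    simp only [List.foldl_cons, List.foldl_nil]
    rcases lt_trichotomy f (L.foldl max 0) with h | h | h
    · rw [if_neg (by omega), if_neg (by omega)]
      have hmax : max (L.foldl max 0) f = L.foldl max 0 := max_eq_left h.le
      have hcz : List.count (L.foldl max 0) [f] = 0 := by
        simp only [List.count_singleton']
        rw [if_neg (by omega)]
      rw [hmax, List.count_append, hcz]
      simp
    · subst h
      rw [if_pos rfl, max_self, List.count_append, List.count_singleton]
      simp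
    · rw [if_neg (by omega), if_pos h]
      have hmax : max (L.foldl max 0) f = f := max_eq_right h.le
      have hcz : List.count f L = 0 := by
        refine List.count_eq_zero.mpr ?_
        intro hmem
        have := (PySem.List.le_foldl_max L (0 : Int)).2 f hmem
        omega
      rw [hmax, List.count_append, hcz, List.count_singleton]
      simp

-- max(scores, default=0) equals the running max from 0 when every score is nonnegative.
lemma pv_maxD_id (L : List Int) (h : ∀ x ∈ L, 0 ≤ x) :
    PySem.List.maxD L (fun x => x) 0 = L.foldl max 0 := by
  cases L with
  | nil => simp [PySem.List.maxD_nil]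
  | cons x t =>
    have hne : (x :: t) ≠ ([] : List Int) := by simp
    have h1 := PySem.List.max?_eq_some_maxD (x :: t) (fun x => x) 0 hne
    rw [PySem.List.max?_id_cons] at h1
    have h2 : PySem.List.maxD (x :: t) (fun x => x) 0 = t.foldl max x := by
      have := h1.symm
      simpa using this
    rw [h2, List.foldl_cons]
    have hx : max (0 : Int) x = x := by
      have := h x (by simp)
      omega
    rw [hx]

-- ===== VERDICT (by name: the statement is the Claim_ definition above) =====
theorem get_acm_team_spec : Claim_equal_get_acm_team := by
  intro array _ hpre
  unfold Spec_get_acm_team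
  obtain ⟨hne, hlen⟩ := hpre
  obtain ⟨a, rest, rfl⟩ : ∃ a rest, array = a :: rest := by
    cases array with
    | nil => exact absurd rfl hne
    | cons a r => exact ⟨a, r, rfl⟩
  have hm : ∀ s ∈ a :: rest, a.toList.length ≤ s.toList.length := by
    intro s hs
    have h := hlen s hs
    rw [PySem.List.pyGetD_zero_cons, PySem.Str.len_eq, PySem.Str.len_eq] at h
    exact_mod_cast h
  unfold get_acm_team get_acm_team_alt
  simp only [PySem.List.len_eq, PySem.List.pyGetD_zero_cons, PySem.Str.len_eq]
  set arr := a :: rest with harr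
  set n : Int := ((arr.length : Nat) : Int) with hn
  set m : Int := ((a.toList.length : Nat) : Int) with hmdef
  set g : Int → Int → Int :=
    fun i j => ((PySem.Int.bitCount (PySem.Int.bor
        (PySem.List.pyGetD (arr.map (fun s => pvMask m s)) i 0)
        (PySem.List.pyGetD (arr.map (fun s => pvMask m s)) j 0)) : Nat) : Int) with hg
  set scores : List Int :=
    (PySem.List.pyRange 0 n).flatMap (fun i => (PySem.List.pyRange (i + 1) n).map (g i)) with hsc
  -- step 1: A's inner per-topic fold is the pair score g i j
  have hA :
      (PySem.List.pyRange 0 n).foldl (fun st i =>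
        (PySem.List.pyRange (i + 1) n).foldl (fun st j =>
          let f : Int :=
            (PySem.List.pyRange 0 m).foldl (fun f x =>
              if PySem.List.pyGetD (PySem.List.pyGetD (arr.map (fun p => (PySem.List.pyRange 0 m).map (fun t => PySem.Str.pyGet? p t == some '1'))) i []) x false
                 || PySem.List.pyGetD (PySem.List.pyGetD (arr.map (fun p => (PySem.List.pyRange 0 m).map (fun t => PySem.Str.pyGet? p t == some '1'))) j []) x false
              then f + 1 else f) 0
          if f = st.1 then (st.1, st.2 + 1)
          else if f > st.1 then (f, 1)
          else st) st) ((0 : Int), (0 : Int))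
      = scores.foldl (fun st f => if f = st.1 then (st.1, st.2 + 1) else if f > st.1 then (f, (1 : Int)) else st)
          ((0 : Int), (0 : Int)) := by
    rw [hsc, List.foldl_flatMap]
    refine PySem.List.foldl_congr_mem _ _ _ _ ?_
    intro st i hi
    obtain ⟨hi0, hin⟩ := PySem.List.mem_pyRange_one.mp hi
    rw [List.foldl_map]
    refine PySem.List.foldl_congr_mem _ _ _ _ ?_
    intro st2 j hj
    obtain ⟨hj1, hjn⟩ := PySem.List.mem_pyRange_one.mp hj
    have hpe := pv_pair arr a.toList.length hm i j hi0 (by rw [hn] at hin; simpa using hin)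
      (by omega) (by rw [hn] at hjn; simpa using hjn)
    simp only [hmdef, hg, hpe]
  have hnonneg : ∀ x ∈ scores, (0 : Int) ≤ x := by
    intro x hx
    rw [hsc] at hx
    simp only [List.mem_flatMap, List.mem_map] at hx
    obtain ⟨i, _, j, _, rfl⟩ := hx
    rw [hg]
    exact Int.natCast_nonneg _
  rw [hA, pv_fold_max_count, pv_maxD_id scores hnonneg, PySem.List.count_eq]
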